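-- pv_equiv track=rewrite | github.com/notEmmi/8-bit-barista-refactor | inventorydata.py | quantityForItem
-- ===== SOURCE A (Python) =====
-- theInventory = [
--     [None, ("Banana", 6), None, None],
--     [None, None, None, ("Milk", 1)],
--     [None, ("Water", 34), None, ("Butter", 14)],
--     [("Tea Leaves", 6), None, None, ("Wheat", 34)],
-- ]
--
-- def hasEnoughOfItem(item) -> bool:
--     if item is None: return False
--     for row in range(len(theInventory)):
--         for column in range(len(theInventory[row])):
--             itemAt = theInventory[row][column]
--             if itemAt is None: continue
--             elif not isinstance(itemAt, tuple): continue
--             elif not isinstance(itemAt[0], str): continue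
--             elif itemAt[0] != item[0]: continue
--             elif isinstance(itemAt[1], int) and isinstance(item[1], int):
--                 if item[1] > itemAt[1]: return False
--                 else: return True
--     return False
--
-- def quantityForItem(item) -> int:
--     if item is None or not hasEnoughOfItem(item): return 0
--     for row in range(len(theInventory)):
--         for column in range(len(theInventory[row])):
--             itemAt = theInventory[row][column]
--             if itemAt is None: continue
--             elif isinstance(itemAt, str) and isinstance(item, str) and itemAt == item: return 1
--             elif isinstance(itemAt, tuple) and isinstance(item, tuple) and itemAt[0] == item[0]:
--                 if isinstance(item[1], int) and isinstance(itemAt[1], int): return itemAt[1]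
--                 else: return 1
--     return 0
-- ===== SOURCE B (Python) =====
-- theInventory = [
--     [None, ("Banana", 6), None, None],
--     [None, None, None, ("Milk", 1)],
--     [None, ("Water", 34), None, ("Butter", 14)],
--     [("Tea Leaves", 6), None, None, ("Wheat", 34)],
-- ]
--
-- # Flat list of the stocked entries, in the grid's row-major order.
-- _STOCKED = [cell for row in theInventory for cell in row if cell is not None]
--
-- def quantityForItem(item) -> int:
--     if item is None:
--         return 0
--     for name, qty in _STOCKED:
--         if name == item[0]:
--             return qty if item[1] <= qty else 0
--     return 0
-- ===== Notes on version B (the rewrite author's own statement) =====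
-- stated objective: simpler
-- what changed: One single scan over a pre-flattened list of stocked entries replaces A's two nested double scans (hasEnoughOfItem followed by a second grid walk), deciding availability and quantity at the first name match.
import Mathlib
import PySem

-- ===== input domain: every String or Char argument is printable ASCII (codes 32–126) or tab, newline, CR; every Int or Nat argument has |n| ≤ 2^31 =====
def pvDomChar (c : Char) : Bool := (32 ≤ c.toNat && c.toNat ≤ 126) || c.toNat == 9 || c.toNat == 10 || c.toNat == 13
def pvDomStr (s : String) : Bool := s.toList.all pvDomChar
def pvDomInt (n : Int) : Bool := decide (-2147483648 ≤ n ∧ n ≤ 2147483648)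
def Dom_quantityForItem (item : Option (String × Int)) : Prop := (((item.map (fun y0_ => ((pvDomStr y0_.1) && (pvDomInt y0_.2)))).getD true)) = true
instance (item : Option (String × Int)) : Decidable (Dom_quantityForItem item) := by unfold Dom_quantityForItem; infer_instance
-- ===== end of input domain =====

-- B replaces A's two nested double scans of the grid (hasEnoughOfItem, then a second walk)
-- by one single pass over a pre-flattened list of stocked entries (objective: simpler).


-- ===== PORT A =====
def theInventory : List (List (Option (String × Int))) :=
  [ [none, some ("Banana", 6), none, none],
    [none, none, none, some ("Milk", 1)],
    [none, some ("Water", 34), none, some ("Butter", 14)],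
    [some ("Tea Leaves", 6), none, none, some ("Wheat", 34)] ]

-- inner column loop of hasEnoughOfItem: some b = early return b, none = loop fell through.
-- (the isinstance checks are identically true at this type and are omitted)
def hasEnoughRow (item : String × Int) : List (Option (String × Int)) → Option Bool
  | [] => none
  | cell :: rest =>
    match cell with
    | none => hasEnoughRow item rest
    | some itemAt =>
      if itemAt.1 ≠ item.1 then hasEnoughRow item rest
      else if item.2 > itemAt.2 then some false else some true

def hasEnoughRows (item : String × Int) : List (List (Option (String × Int))) → Bool
  | [] => false
  | row :: rest =>
    match hasEnoughRow item row with
    | some b => b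
    | none => hasEnoughRows item rest

def hasEnoughOfItem (item : Option (String × Int)) : Bool :=
  match item with
  | none => false
  | some it => hasEnoughRows it theInventory

-- inner column loop of quantityForItem's second scan (the str/str branch never fires at this type)
def qtyRow (item : String × Int) : List (Option (String × Int)) → Option Int
  | [] => none
  | cell :: rest =>
    match cell with
    | none => qtyRow item rest
    | some itemAt =>
      if itemAt.1 = item.1 then some itemAt.2
      else qtyRow item rest

def qtyRows (item : String × Int) : List (List (Option (String × Int))) → Int
  | [] => 0
  | row :: rest =>
    match qtyRow item row with
    | some q => q
    | none => qtyRows item rest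

def quantityForItem (item : Option (String × Int)) : Int :=
  match item with
  | none => 0
  | some it => if ¬ hasEnoughOfItem item then 0 else qtyRows it theInventory

-- ===== PORT B =====
-- flat list of the stocked entries, row-major (the module-level _STOCKED)
def stocked : List (String × Int) :=
  [("Banana", 6), ("Milk", 1), ("Water", 34), ("Butter", 14), ("Tea Leaves", 6), ("Wheat", 34)]

def scanStocked (name : String) (want : Int) : List (String × Int) → Int
  | [] => 0
  | (n, qty) :: rest =>
    if n = name then (if want ≤ qty then qty else 0)
    else scanStocked name want rest

def quantityForItem_alt (item : Option (String × Int)) : Int :=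
  match item with
  | none => 0
  | some it => scanStocked it.1 it.2 stocked

-- ===== PRECONDITION & SPEC =====
def Spec_quantityForItem (item : Option (String × Int)) (out : Int) : Prop := out = quantityForItem_alt item
instance (item : Option (String × Int)) (out : Int) : Decidable (Spec_quantityForItem item out) := by unfold Spec_quantityForItem; infer_instance

-- ===== CLAIM (what is proved, stated in full; the proofs are below) =====
def Claim_equal_quantityForItem : Prop := ∀ (item : Option (String × Int)), Dom_quantityForItem item → Spec_quantityForItem item (quantityForItem item)

-- ===== LEMMAS AND PROOFS =====

-- ===== VERDICT (by name: the statement is the Claim_ definition above) =====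
theorem quantityForItem_spec : Claim_equal_quantityForItem := by
  intro item _
  unfold Spec_quantityForItem
  match item with
  | none => rfl
  | some ⟨n, w⟩ =>
    by_cases h1 : n = "Banana"
    · subst h1
      simp only [quantityForItem, quantityForItem_alt, hasEnoughOfItem, theInventory, stocked,
        hasEnoughRows, hasEnoughRow, qtyRows, qtyRow, scanStocked, String.reduceEq, reduceIte]
      by_cases h : w ≤ 6
      · simp [show ¬ (6 < w) by omega, h]
      · simp [show (6:ℤ) < w by omega, h]
    · by_cases h2 : n = "Milk"
      · subst h2
        simp only [quantityForItem, quantityForItem_alt, hasEnoughOfItem, theInventory, stocked,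
          hasEnoughRows, hasEnoughRow, qtyRows, qtyRow, scanStocked, String.reduceEq, reduceIte]
        by_cases h : w ≤ 1
        · simp [show ¬ (1 < w) by omega, h]
        · simp [show (1:ℤ) < w by omega, h]
      · by_cases h3 : n = "Water"
        · subst h3
          simp only [quantityForItem, quantityForItem_alt, hasEnoughOfItem, theInventory, stocked,
            hasEnoughRows, hasEnoughRow, qtyRows, qtyRow, scanStocked, String.reduceEq, reduceIte]
          by_cases h : w ≤ 34
          · simp [show ¬ (34 < w) by omega, h]
          · simp [show (34:ℤ) < w by omega, h]
        · by_cases h4 : n = "Butter"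
          · subst h4
            simp only [quantityForItem, quantityForItem_alt, hasEnoughOfItem, theInventory, stocked,
              hasEnoughRows, hasEnoughRow, qtyRows, qtyRow, scanStocked, String.reduceEq, reduceIte]
            by_cases h : w ≤ 14
            · simp [show ¬ (14 < w) by omega, h]
            · simp [show (14:ℤ) < w by omega, h]
          · by_cases h5 : n = "Tea Leaves"
            · subst h5
              simp only [quantityForItem, quantityForItem_alt, hasEnoughOfItem, theInventory,
                stocked, hasEnoughRows, hasEnoughRow, qtyRows, qtyRow, scanStocked,
                String.reduceEq, reduceIte]
              by_cases h : w ≤ 6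
              · simp [show ¬ (6 < w) by omega, h]
              · simp [show (6:ℤ) < w by omega, h]
            · by_cases h6 : n = "Wheat"
              · subst h6
                simp only [quantityForItem, quantityForItem_alt, hasEnoughOfItem, theInventory,
                  stocked, hasEnoughRows, hasEnoughRow, qtyRows, qtyRow, scanStocked,
                  String.reduceEq, reduceIte]
                by_cases h : w ≤ 34
                · simp [show ¬ (34 < w) by omega, h]
                · simp [show (34:ℤ) < w by omega, h]
              · simp [quantityForItem, quantityForItem_alt, hasEnoughOfItem, theInventory,
                  stocked, hasEnoughRows, hasEnoughRow, scanStocked,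
                  Ne.symm h1, Ne.symm h2, Ne.symm h3, Ne.symm h4, Ne.symm h5, Ne.symm h6]
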